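-- pv_equiv track=rewrite | github.com/lequycong204/second_language_python | Midterm B1/Base.py | sort_two_four
-- ===== SOURCE A (Python) =====
-- def sort_two_four(arr):
--     """
--     arr là một danh sách các số nguyên. hãy sắp xếp các phần tử trong danh sách theo quy tắc sau:
--
--     các số chia hết cho 4 về đầu danh sách,
--     các số chia hết cho 2 nhưng không chia hết cho 4. về cuối danh sách
--     Số chia hết cho 4 giảm dần chia hết cho 2 tăng dần.
--
--     Ví dụ:
--     input: [4, 76, 98, 44, 92, 2, 68, 38, 86, 46]
--     output: [92, 76, 68, 44, 4, 2, 38, 46, 86, 98]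
--     """
--
--     num_top = []
--     num_bot = []
--
--     for i in arr:
--         if i % 4 == 0:
--             num_top.append(i)
--         elif i % 2 == 0:
--             num_bot.append(i)
--     num_top.sort(reverse=True)
--     num_bot.sort()
--     return num_top + num_bot
-- ===== SOURCE B (Python) =====
-- def sort_two_four(arr):
--     evens = [x for x in arr if x % 2 == 0]
--     return sorted(evens, key=lambda x: (0, -x) if x % 4 == 0 else (1, x))
-- ===== Notes on version B (the rewrite author's own statement) =====
-- stated objective: idiomatic
-- what changed: Replaces the partition-into-two-lists-then-two-sorts loop with one filter of the even numbers and a single keyed sort whose composite key (0,-x) / (1,x) yields the div-4 part descending followed by the div-2-only part ascending.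
import Mathlib
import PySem

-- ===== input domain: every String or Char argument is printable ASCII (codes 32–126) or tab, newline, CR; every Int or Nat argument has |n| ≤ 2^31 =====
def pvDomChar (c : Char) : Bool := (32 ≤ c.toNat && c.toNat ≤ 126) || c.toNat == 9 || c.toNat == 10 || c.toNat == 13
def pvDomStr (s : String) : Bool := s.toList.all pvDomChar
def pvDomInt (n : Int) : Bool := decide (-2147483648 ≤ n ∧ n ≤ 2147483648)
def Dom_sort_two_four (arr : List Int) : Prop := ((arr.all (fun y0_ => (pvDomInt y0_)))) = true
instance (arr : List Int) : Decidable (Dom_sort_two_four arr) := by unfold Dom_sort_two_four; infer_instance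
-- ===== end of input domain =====

-- B replaces A's partition-into-two-lists-then-two-sorts with one filter plus a
-- single composite-key sort (objective: idiomatic); same return value everywhere.

-- ===== PORT A =====
def sort_two_four (arr : List Int) : List Int :=
  let st := arr.foldl (fun (acc : List Int × List Int) i =>
    if PySem.Int.mod i 4 == 0 then (acc.1 ++ [i], acc.2)
    else if PySem.Int.mod i 2 == 0 then (acc.1, acc.2 ++ [i])
    else acc) ([], [])
  PySem.List.sorted st.1 (fun x => x) true ++ PySem.List.sorted st.2 (fun x => x) false

-- ===== PORT B =====
def sort_two_four_alt (arr : List Int) : List Int :=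
  let evens := arr.filter (fun x => PySem.Int.mod x 2 == 0)
  PySem.List.sorted2 evens
    (fun x => if PySem.Int.mod x 4 == 0 then (0 : Int) else 1)
    (fun x => if PySem.Int.mod x 4 == 0 then -x else x) false

-- ===== PRECONDITION & SPEC =====
def Spec_sort_two_four (arr : List Int) (out : List Int) : Prop := out = sort_two_four_alt arr
instance (arr : List Int) (out : List Int) : Decidable (Spec_sort_two_four arr out) := by unfold Spec_sort_two_four; infer_instance

-- ===== CLAIM (what is proved, stated in full; the proofs are below) =====
def Claim_equal_sort_two_four : Prop := ∀ (arr : List Int), Dom_sort_two_four arr → Spec_sort_two_four arr (sort_two_four arr)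

-- ===== LEMMAS AND PROOFS =====

-- abbreviations for the two tests and B's composite-key comparison
def pvP4 (x : Int) : Bool := PySem.Int.mod x 4 == 0
def pvP2 (x : Int) : Bool := PySem.Int.mod x 2 == 0
def pvK1 (x : Int) : Int := if PySem.Int.mod x 4 == 0 then (0 : Int) else 1
def pvK2 (x : Int) : Int := if PySem.Int.mod x 4 == 0 then -x else x
def pvLt (a b : Int) : Bool :=
  decide (pvK1 a < pvK1 b) || (!decide (pvK1 b < pvK1 a) && decide (pvK2 a < pvK2 b))
def pvR (a b : Int) : Prop := pvLt b a = false

theorem pvLt_asymm_trans (x y z : Int) (h1 : pvLt x y = true) (h2 : pvLt z y = false) :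
    pvLt z x = false := by
  simp only [pvLt, Bool.or_eq_true, Bool.or_eq_false_iff, Bool.and_eq_true,
    Bool.and_eq_false_iff, Bool.not_eq_true', Bool.not_eq_false',
    decide_eq_true_iff, decide_eq_false_iff_not] at *
  omega

theorem pvLt_irrefl_of (x y : Int) (h : pvLt x y = true) : pvLt y x = false := by
  simp only [pvLt, Bool.or_eq_true, Bool.or_eq_false_iff, Bool.and_eq_true,
    Bool.and_eq_false_iff, Bool.not_eq_true', Bool.not_eq_false',
    decide_eq_true_iff, decide_eq_false_iff_not] at *
  omega

theorem pvR_antisymm (a b : Int) (h1 : pvR a b) (h2 : pvR b a) : a = b := by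
  simp only [pvR, pvLt, pvK1, pvK2, Bool.or_eq_false_iff, Bool.and_eq_false_iff,
    Bool.not_eq_false', decide_eq_true_iff, decide_eq_false_iff_not] at h1 h2
  split_ifs at h1 h2 <;> omega

-- inserting with pvLt preserves pvR-sortedness
theorem insertBy_pairwise_pvR (x : Int) (ys : List Int)
    (h : List.Pairwise pvR ys) :
    List.Pairwise pvR (PySem.List.insertBy pvLt x ys) := by
  induction ys with
  | nil => simp [PySem.List.insertBy]
  | cons y ys ih =>
    obtain ⟨hy, hys⟩ := List.pairwise_cons.mp h
    by_cases hxy : pvLt x y = true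
    · rw [show PySem.List.insertBy pvLt x (y :: ys) = x :: y :: ys from by
        simp [PySem.List.insertBy, hxy]]
      refine List.Pairwise.cons ?_ (List.Pairwise.cons hy hys)
      intro z hz
      rcases List.mem_cons.mp hz with rfl | hz
      · exact pvLt_irrefl_of x z hxy
      · exact pvLt_asymm_trans x y z hxy (hy z hz)
    · rw [show PySem.List.insertBy pvLt x (y :: ys) = y :: PySem.List.insertBy pvLt x ys from by
        simp [PySem.List.insertBy, hxy]]
      refine List.Pairwise.cons ?_ (ih hys)
      intro z hz
      have hz' : z ∈ x :: ys := (PySem.List.insertBy_perm pvLt x ys).mem_iff.mp hz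
      rcases List.mem_cons.mp hz' with rfl | hz'
      · exact Bool.eq_false_iff.mpr hxy
      · exact hy z hz'

theorem foldl_insertBy_pairwise_pvR (xs acc : List Int)
    (h : List.Pairwise pvR acc) :
    List.Pairwise pvR (xs.foldl (fun acc x => PySem.List.insertBy pvLt x acc) acc) := by
  induction xs generalizing acc with
  | nil => exact h
  | cons x xs ih => exact ih _ (insertBy_pairwise_pvR x acc h)

-- B's output is pvR-sorted and a permutation of the evens
theorem alt_pairwise (arr : List Int) :
    List.Pairwise pvR (sort_two_four_alt arr) := by
  have : sort_two_four_alt arr =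
      (arr.filter pvP2).foldl (fun acc x => PySem.List.insertBy pvLt x acc) [] := by
    rfl
  rw [this]
  exact foldl_insertBy_pairwise_pvR _ [] (by simp)

theorem alt_perm (arr : List Int) :
    (sort_two_four_alt arr).Perm (arr.filter pvP2) :=
  PySem.List.sorted2_perm _ _ _ _

-- 4 ∣ x → 2 ∣ x, on the Boolean tests
theorem pvP4_imp_pvP2 (x : Int) (h : pvP4 x = true) : pvP2 x = true := by
  simp only [pvP4, pvP2, beq_iff_eq, PySem.Int.mod_eq_zero_iff_dvd] at *
  exact dvd_trans ⟨2, by norm_num⟩ h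

-- A's accumulator loop builds the two filters
theorem loop_eq (arr t b : List Int) :
    arr.foldl (fun (acc : List Int × List Int) i =>
      if PySem.Int.mod i 4 == 0 then (acc.1 ++ [i], acc.2)
      else if PySem.Int.mod i 2 == 0 then (acc.1, acc.2 ++ [i])
      else acc) (t, b)
    = (t ++ arr.filter pvP4, b ++ arr.filter (fun x => !pvP4 x && pvP2 x)) := by
  induction arr generalizing t b with
  | nil => simp
  | cons i arr ih =>
    rw [List.foldl_cons]
    by_cases h4 : (PySem.Int.mod i 4 == 0) = true
    · rw [if_pos h4, ih]
      have h4' : pvP4 i = true := h4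
      simp only [List.filter_cons, h4', Bool.not_true, Bool.false_and,
        Bool.false_eq_true, if_true, if_false]
      simp
    · rw [if_neg h4]
      have h4' : pvP4 i = false := Bool.eq_false_iff.mpr h4
      by_cases h2 : (PySem.Int.mod i 2 == 0) = true
      · rw [if_pos h2, ih]
        have h2' : pvP2 i = true := h2
        simp only [List.filter_cons, h4', h2', Bool.not_false, Bool.true_and,
          Bool.false_eq_true, if_false, if_true]
        simp
      · rw [if_neg h2, ih]
        have h2' : pvP2 i = false := Bool.eq_false_iff.mpr h2
        simp only [List.filter_cons, h4', h2', Bool.not_false, Bool.true_and,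
          Bool.false_eq_true, if_false]

-- the two partitions in terms of the evens list
theorem top_eq (arr : List Int) :
    arr.filter pvP4 = (arr.filter pvP2).filter pvP4 := by
  rw [List.filter_filter]
  apply List.filter_congr
  intro x _
  by_cases h : pvP4 x = true
  · simp [h, pvP4_imp_pvP2 x h]
  · simp [Bool.eq_false_iff.mpr h]

theorem bot_eq (arr : List Int) :
    arr.filter (fun x => !pvP4 x && pvP2 x) = (arr.filter pvP2).filter (fun x => !pvP4 x) := by
  rw [List.filter_filter]

-- A's output is a permutation of the evens
theorem a_perm (arr : List Int) :
    (sort_two_four arr).Perm (arr.filter pvP2) := by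
  simp only [sort_two_four, loop_eq, List.nil_append]
  rw [top_eq, bot_eq]
  exact ((PySem.List.sorted_perm _ _ _).append (PySem.List.sorted_perm _ _ _)).trans
    (List.filter_append_perm _ _)

-- A's output is pvR-sorted
theorem a_pairwise (arr : List Int) :
    List.Pairwise pvR (sort_two_four arr) := by
  simp only [sort_two_four, loop_eq, List.nil_append]
  rw [List.pairwise_append]
  have hmemT : ∀ x ∈ PySem.List.sorted (arr.filter pvP4) (fun x => x) true,
      (PySem.Int.mod x 4 == 0) = true := by
    intro x hx
    have hx' := (PySem.List.mem_sorted (xs := arr.filter pvP4)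
      (key := fun x => x) (rev := true) (x := x)).mp hx
    exact (List.mem_filter.mp hx').2
  have hmemB : ∀ x ∈ PySem.List.sorted (arr.filter (fun x => !pvP4 x && pvP2 x)) (fun x => x) false,
      (PySem.Int.mod x 4 == 0) = false := by
    intro x hx
    have hx' := (PySem.List.mem_sorted (xs := arr.filter (fun x => !pvP4 x && pvP2 x))
      (key := fun x => x) (rev := false) (x := x)).mp hx
    have hp := (List.mem_filter.mp hx').2
    simp only [pvP4, Bool.and_eq_true, Bool.not_eq_true'] at hp
    exact hp.1
  refine ⟨?_, ?_, ?_⟩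
  · refine List.Pairwise.imp_of_mem ?_
      (PySem.List.sorted_pairwise_rev (arr.filter pvP4) (fun x => x))
    intro a b ha hb hle
    have h4a := hmemT a ha; have h4b := hmemT b hb
    simp only [pvR, pvLt, pvK1, pvK2, h4a, h4b, if_true, Bool.or_eq_false_iff,
      Bool.and_eq_false_iff, Bool.not_eq_false', decide_eq_true_iff,
      decide_eq_false_iff_not]
    omega
  · refine List.Pairwise.imp_of_mem ?_
      (PySem.List.sorted_pairwise (arr.filter (fun x => !pvP4 x && pvP2 x)) (fun x => x))
    intro a b ha hb hle
    have h4a := hmemB a ha; have h4b := hmemB b hb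
    simp only [pvR, pvLt, pvK1, pvK2, h4a, h4b, Bool.false_eq_true, if_false,
      Bool.or_eq_false_iff, Bool.and_eq_false_iff, Bool.not_eq_false',
      decide_eq_true_iff, decide_eq_false_iff_not]
    omega
  · intro a ha b hb
    have h4a := hmemT a ha; have h4b := hmemB b hb
    simp only [pvR, pvLt, pvK1, pvK2, h4a, h4b, if_true, Bool.false_eq_true, if_false,
      Bool.or_eq_false_iff, Bool.and_eq_false_iff, Bool.not_eq_false',
      decide_eq_true_iff, decide_eq_false_iff_not]
    omega

-- ===== VERDICT (by name: the statement is the Claim_ definition above) =====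
theorem sort_two_four_spec : Claim_equal_sort_two_four := by
  intro arr _
  unfold Spec_sort_two_four
  refine List.eq_of_perm_of_sorted (le := pvR) ?_ (a_pairwise arr) (alt_pairwise arr) ?_
  · intro a b _ _ h1 h2
    exact pvR_antisymm a b h1 h2
  · exact (a_perm arr).trans (alt_perm arr).symm
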